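-- pv_equiv track=rewrite | github.com/juliencollos/APPERO1 | drone/to_euler.py | is_edge_connected
-- ===== SOURCE A (Python) =====
-- def is_edge_connected(n, edges):
--     if n == 0 or len(edges) == 0:
--         return True
--     succ = [[] for a in range(n)]
--     for (a,b) in edges:
--         succ[a].append(b)
--         succ[b].append(a)
--     tmp = [False] * n
--     init = edges[0][0]
--     tmp[init] = True
--     tmp1 = [init]
--     while tmp1:
--         s = tmp1.pop()
--         for d in succ[s]:
--             if tmp[d]:
--                 continue
--             tmp[d] = True
--             tmp1.append(d)
--     for a in range(n):
--         if succ[a] and not tmp[a]: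
--             return False
--     return True
-- ===== SOURCE B (Python) =====
-- def is_edge_connected(n, edges):
--     if n == 0 or len(edges) == 0:
--         return True
--     reached = [False] * n
--     reached[edges[0][0]] = True
--     changed = True
--     while changed:
--         changed = False
--         for a, b in edges:
--             if reached[a] != reached[b]:
--                 reached[a] = reached[b] = True
--                 changed = True
--     touched = [False] * n
--     for a, b in edges:
--         touched[a] = True
--         touched[b] = True
--     return all(not t or r for r, t in zip(reached, touched))
-- ===== Notes on version B (the rewrite author's own statement) =====
-- stated objective: alternative
-- what changed: Replaces the adjacency-list build plus explicit-stack DFS with a fixed-point edge relaxation: repeatedly sweep the edge list marking both endpoints when exactly one is reached until a sweep changes nothing, then compare against a 'touched' endpoint bitmap via zip.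
import Mathlib
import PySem

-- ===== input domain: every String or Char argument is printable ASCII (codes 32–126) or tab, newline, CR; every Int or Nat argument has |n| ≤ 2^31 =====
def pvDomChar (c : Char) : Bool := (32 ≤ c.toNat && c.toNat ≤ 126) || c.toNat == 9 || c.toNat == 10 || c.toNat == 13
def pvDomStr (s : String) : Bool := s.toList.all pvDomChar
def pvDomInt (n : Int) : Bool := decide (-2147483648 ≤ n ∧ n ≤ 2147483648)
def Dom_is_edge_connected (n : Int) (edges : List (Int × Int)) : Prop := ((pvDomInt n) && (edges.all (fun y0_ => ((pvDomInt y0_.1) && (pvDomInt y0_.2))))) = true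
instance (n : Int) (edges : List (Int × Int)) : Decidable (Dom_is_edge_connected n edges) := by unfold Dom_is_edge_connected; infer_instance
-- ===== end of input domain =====

-- B replaces A's adjacency-list build + explicit-stack DFS by fixed-point edge relaxation (alternative algorithm, similar cost).

-- ===== PORT A =====
-- inner 'for d in succ[s]' body of A's while loop: state = (tmp, tmp1)
def pvDfsInner (tmp : List Bool) (tmp1 : List Int) (ds : List Int) : List Bool × List Int :=
  ds.foldl (fun st d =>
    if PySem.List.pyGetD st.1 d false then st
    else (PySem.List.pySetD st.1 d true, st.2 ++ [d])) (tmp, tmp1)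

-- A's 'while tmp1:' loop; fuel only makes the recursion structural (n+1 suffices on Pre_, proved below)
def pvDfsLoop (succ : List (List Int)) : Nat → List Bool → List Int → List Bool
  | 0, tmp, _ => tmp
  | fuel+1, tmp, tmp1 =>
    match tmp1.getLast? with
    | none => tmp
    | some s =>
      let st := pvDfsInner tmp tmp1.dropLast (PySem.List.pyGetD succ s [])
      pvDfsLoop succ fuel st.1 st.2

def is_edge_connected (n : Int) (edges : List (Int × Int)) : Bool :=
  if n = 0 || edges.length = 0 then true
  else
    let succ := edges.foldl (fun succ p =>
        let succ := PySem.List.pySetD succ p.1 (PySem.List.pyGetD succ p.1 [] ++ [p.2])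
        PySem.List.pySetD succ p.2 (PySem.List.pyGetD succ p.2 [] ++ [p.1]))
      ((PySem.List.pyRange 0 n 1).map (fun _ => ([] : List Int)))
    let init := (PySem.List.pyGetD edges 0 ((0 : Int), (0 : Int))).1
    let tmp := PySem.List.pySetD (List.replicate n.toNat false) init true
    let tmp := pvDfsLoop succ (n.toNat + 1) tmp [init]
    (PySem.List.pyRange 0 n 1).all (fun a =>
      !(!(PySem.List.pyGetD succ a []).isEmpty && !PySem.List.pyGetD tmp a false))

-- ===== PORT B =====
-- one 'for a, b in edges' sweep of B: state = (reached, changed)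
def pvBPass (edges : List (Int × Int)) (st : List Bool × Bool) : List Bool × Bool :=
  edges.foldl (fun st p =>
    if PySem.List.pyGetD st.1 p.1 false != PySem.List.pyGetD st.1 p.2 false then
      (PySem.List.pySetD (PySem.List.pySetD st.1 p.1 true) p.2 true, true)
    else st) st

-- B's 'while changed:' loop; fuel only makes the recursion structural (n+1 suffices on Pre_, proved below)
def pvBLoop (edges : List (Int × Int)) : Nat → List Bool → List Bool
  | 0, r => r
  | fuel+1, r =>
    let st := pvBPass edges (r, false)
    if st.2 then pvBLoop edges fuel st.1 else st.1

def is_edge_connected_alt (n : Int) (edges : List (Int × Int)) : Bool :=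
  if n = 0 || edges.length = 0 then true
  else
    let reached := PySem.List.pySetD (List.replicate n.toNat false)
      (PySem.List.pyGetD edges 0 ((0 : Int), (0 : Int))).1 true
    let reached := pvBLoop edges (n.toNat + 1) reached
    let touched := edges.foldl (fun t p =>
        PySem.List.pySetD (PySem.List.pySetD t p.1 true) p.2 true)
      (List.replicate n.toNat false)
    (reached.zip touched).all (fun p => !p.2 || p.1)

-- ===== PRECONDITION & SPEC =====
-- Pre_ excludes exactly the inputs where Python raises IndexError: some edge endpoint outside [-n, n)
-- (both guard cases n == 0 and edges == [] return before any indexing and stay inside Pre_).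
def Pre_is_edge_connected (n : Int) (edges : List (Int × Int)) : Prop :=
  n = 0 ∨ edges = [] ∨ (0 < n ∧ ∀ p ∈ edges, (-n ≤ p.1 ∧ p.1 < n) ∧ (-n ≤ p.2 ∧ p.2 < n))
instance (n : Int) (edges : List (Int × Int)) : Decidable (Pre_is_edge_connected n edges) := by
  unfold Pre_is_edge_connected; infer_instance

def pvWitness_is_edge_connected : Int × (List (Int × Int)) := (3, [(0, 1), (1, 2)])

def Spec_is_edge_connected (n : Int) (edges : List (Int × Int)) (out : Bool) : Prop := out = is_edge_connected_alt n edges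
instance (n : Int) (edges : List (Int × Int)) (out : Bool) : Decidable (Spec_is_edge_connected n edges out) := by unfold Spec_is_edge_connected; infer_instance

-- ===== CLAIM (what is proved, stated in full; the proofs are below) =====
def Claim_equal_is_edge_connected : Prop := ∀ (n : Int) (edges : List (Int × Int)), Dom_is_edge_connected n edges → Pre_is_edge_connected n edges → Spec_is_edge_connected n edges (is_edge_connected n edges)

-- ===== LEMMAS AND PROOFS =====

def pvNrm (L : Nat) (x : Int) : Nat := if 0 ≤ x then x.toNat else L - (-x).toNat

def pvInR (L : Nat) (x : Int) : Prop := -(L : Int) ≤ x ∧ x < L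

theorem pvNrm_lt (L : Nat) (x : Int) (h : pvInR L x) (hL : 0 < L) : pvNrm L x < L := by
  unfold pvNrm; unfold pvInR at h; split <;> omega

theorem pvGetD_nrm {α : Type} (xs : List α) (x : Int) (d : α) (h : pvInR xs.length x) :
    PySem.List.pyGetD xs x d = xs.getD (pvNrm xs.length x) d := by
  unfold pvInR at h
  simp only [PySem.List.pyGetD, PySem.List.pyGet?, PySem.List.pyIdx?, pvNrm]
  split <;> simp_all

theorem pvSetD_nrm {α : Type} (xs : List α) (x : Int) (v : α) (h : pvInR xs.length x) :
    PySem.List.pySetD xs x v = xs.set (pvNrm xs.length x) v := by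
  unfold pvInR at h
  simp only [PySem.List.pySetD, PySem.List.pySet?, PySem.List.pyIdx?, pvNrm]
  split <;> simp_all

theorem pvGetD_set {α : Type} (xs : List α) (i j : Nat) (v d : α) (hi : i < xs.length) :
    (xs.set i v).getD j d = if j = i then v else xs.getD j d := by
  simp only [List.getD_eq_getElem?_getD, List.getElem?_set]
  by_cases hj : j = i
  · subst hj; simp [hi]
  · rw [if_neg (by omega), if_neg hj]

theorem pvCount_set_true (xs : List Bool) (i : Nat) (h : i < xs.length) :
    (xs.set i true).count false + (if xs.getD i false = false then 1 else 0) = xs.count false := by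
  induction xs generalizing i with
  | nil => simp at h
  | cons hd tl ih =>
    cases i with
    | zero => cases hd <;> simp [List.count_cons]
    | succ k =>
      have h' : k < tl.length := by simpa using h
      have := ih k h'
      rw [List.set_cons_succ, List.getD_cons_succ, List.count_cons, List.count_cons]
      by_cases hg : tl.getD k false = false <;> cases hd <;> simp [hg] at this ⊢ <;> omega

-- continues with pre.lean preamble

theorem pvGetD_replicate (N x : Nat) : (List.replicate N false).getD x false = false := by
  cases h : (List.replicate N false)[x]? with
  | none => simp [List.getD_eq_getElem?_getD, h]
  | some b =>
    have := List.mem_of_getElem? h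
    simp [List.eq_of_mem_replicate this, List.getD_eq_getElem?_getD, h]

theorem pvGetD_out {α : Type} (xs : List α) (x : Nat) (d : α) (h : xs.length ≤ x) :
    xs.getD x d = d := by
  simp [List.getD_eq_getElem?_getD, List.getElem?_eq_none_iff.mpr h]

theorem pvMem_set_append {α : Type} (xs : List (List α)) (i x : Nat) (v : α) (d : α)
    (hi : i < xs.length) :
    (d ∈ (xs.set i (xs.getD i [] ++ [v])).getD x [] ↔ d ∈ xs.getD x [] ∨ (x = i ∧ d = v)) := by
  rw [pvGetD_set _ _ _ _ _ hi]
  by_cases hx : x = i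
  · subst hx; simp
  · simp [hx]

theorem pvSucc_facts (N : Nat) (hN : 0 < N) :
    ∀ (es : List (Int × Int)) (acc : List (List Int)),
    acc.length = N → (∀ p ∈ es, pvInR N p.1 ∧ pvInR N p.2) →
    (es.foldl (fun succ p =>
        let succ := PySem.List.pySetD succ p.1 (PySem.List.pyGetD succ p.1 [] ++ [p.2])
        PySem.List.pySetD succ p.2 (PySem.List.pyGetD succ p.2 [] ++ [p.1])) acc).length = N ∧
    ∀ x d, (d ∈ (es.foldl (fun succ p =>
        let succ := PySem.List.pySetD succ p.1 (PySem.List.pyGetD succ p.1 [] ++ [p.2])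
        PySem.List.pySetD succ p.2 (PySem.List.pyGetD succ p.2 [] ++ [p.1])) acc).getD x [] ↔
      d ∈ acc.getD x [] ∨ ∃ p ∈ es, ((pvNrm N p.1 = x ∧ p.2 = d) ∨ (pvNrm N p.2 = x ∧ p.1 = d))) := by
  intro es
  induction es with
  | nil => intro acc h1 _; simp [h1]
  | cons p es ih =>
    intro acc h1 h2
    obtain ⟨hp1, hp2⟩ := h2 p (by simp)
    have hl1 : (PySem.List.pySetD acc p.1 (PySem.List.pyGetD acc p.1 [] ++ [p.2])).length = N := by
      rw [pvSetD_nrm _ _ _ (by rw [h1]; exact hp1)]; simp [h1]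
    set acc1 := PySem.List.pySetD acc p.1 (PySem.List.pyGetD acc p.1 [] ++ [p.2]) with hacc1
    have hl2 : (PySem.List.pySetD acc1 p.2 (PySem.List.pyGetD acc1 p.2 [] ++ [p.1])).length = N := by
      rw [pvSetD_nrm _ _ _ (by rw [hl1]; exact hp2)]; simp [hl1]
    set acc2 := PySem.List.pySetD acc1 p.2 (PySem.List.pyGetD acc1 p.2 [] ++ [p.1]) with hacc2
    obtain ⟨ihl, ihm⟩ := ih acc2 hl2 (fun q hq => h2 q (by simp [hq]))
    constructor
    · simpa [List.foldl_cons] using ihl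
    · intro x d
      have e1 : ∀ y e, e ∈ acc1.getD y [] ↔ e ∈ acc.getD y [] ∨ (y = pvNrm N p.1 ∧ e = p.2) := by
        intro y e
        rw [hacc1, pvSetD_nrm _ _ _ (by rw [h1]; exact hp1), pvGetD_nrm _ _ _ (by rw [h1]; exact hp1), h1]
        exact pvMem_set_append acc (pvNrm N p.1) y p.2 e (by rw [h1]; exact pvNrm_lt N p.1 hp1 hN)
      have e2 : ∀ y e, e ∈ acc2.getD y [] ↔ e ∈ acc1.getD y [] ∨ (y = pvNrm N p.2 ∧ e = p.1) := by
        intro y e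
        rw [hacc2, pvSetD_nrm _ _ _ (by rw [hl1]; exact hp2), pvGetD_nrm _ _ _ (by rw [hl1]; exact hp2), hl1]
        exact pvMem_set_append acc1 (pvNrm N p.2) y p.1 e (by rw [hl1]; exact pvNrm_lt N p.2 hp2 hN)
      have := ihm x d
      simp only [List.foldl_cons]
      refine Iff.trans this ?_
      simp only [e2, e1, List.mem_cons]
      constructor
      · rintro (((h | ⟨rfl, rfl⟩) | ⟨rfl, rfl⟩) | ⟨q, hq, hcase⟩)
        · exact Or.inl h
        · exact Or.inr ⟨p, Or.inl rfl, Or.inl ⟨rfl, rfl⟩⟩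
        · exact Or.inr ⟨p, Or.inl rfl, Or.inr ⟨rfl, rfl⟩⟩
        · exact Or.inr ⟨q, Or.inr hq, hcase⟩
      · rintro (h | ⟨q, (rfl | hq), hcase⟩)
        · exact Or.inl (Or.inl (Or.inl h))
        · rcases hcase with ⟨h1', h2'⟩ | ⟨h1', h2'⟩
          · exact Or.inl (Or.inl (Or.inr ⟨h1'.symm, h2'.symm⟩))
          · exact Or.inl (Or.inr ⟨h1'.symm, h2'.symm⟩)
        · exact Or.inr ⟨q, hq, hcase⟩

theorem pvTouched_facts (N : Nat) (hN : 0 < N) :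
    ∀ (es : List (Int × Int)) (t : List Bool),
    t.length = N → (∀ p ∈ es, pvInR N p.1 ∧ pvInR N p.2) →
    (es.foldl (fun t p => PySem.List.pySetD (PySem.List.pySetD t p.1 true) p.2 true) t).length = N ∧
    ∀ x, ((es.foldl (fun t p => PySem.List.pySetD (PySem.List.pySetD t p.1 true) p.2 true) t).getD x false = true ↔
      t.getD x false = true ∨ ∃ p ∈ es, (pvNrm N p.1 = x ∨ pvNrm N p.2 = x)) := by
  intro es
  induction es with
  | nil => intro t h1 _; simp [h1]
  | cons p es ih =>
    intro t h1 h2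
    obtain ⟨hp1, hp2⟩ := h2 p (by simp)
    have hl1 : (PySem.List.pySetD t p.1 true).length = N := by
      rw [pvSetD_nrm _ _ _ (by rw [h1]; exact hp1)]; simp [h1]
    set t1 := PySem.List.pySetD t p.1 true with ht1
    have hl2 : (PySem.List.pySetD t1 p.2 true).length = N := by
      rw [pvSetD_nrm _ _ _ (by rw [hl1]; exact hp2)]; simp [hl1]
    set t2 := PySem.List.pySetD t1 p.2 true with ht2
    obtain ⟨ihl, ihm⟩ := ih t2 hl2 (fun q hq => h2 q (by simp [hq]))
    refine ⟨by simpa [List.foldl_cons] using ihl, ?_⟩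
    intro x
    have e1 : ∀ y, t1.getD y false = true ↔ t.getD y false = true ∨ y = pvNrm N p.1 := by
      intro y
      rw [ht1, pvSetD_nrm _ _ _ (by rw [h1]; exact hp1), h1,
        pvGetD_set _ _ _ _ _ (by rw [h1]; exact pvNrm_lt N p.1 hp1 hN)]
      split <;> simp_all
    have e2 : ∀ y, t2.getD y false = true ↔ t1.getD y false = true ∨ y = pvNrm N p.2 := by
      intro y
      rw [ht2, pvSetD_nrm _ _ _ (by rw [hl1]; exact hp2), hl1,
        pvGetD_set _ _ _ _ _ (by rw [hl1]; exact pvNrm_lt N p.2 hp2 hN)]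
      split <;> simp_all
    simp only [List.foldl_cons]
    refine Iff.trans (ihm x) ?_
    simp only [e2, e1, List.mem_cons]
    constructor
    · rintro (((h | rfl) | rfl) | ⟨q, hq, hcase⟩)
      · exact Or.inl h
      · exact Or.inr ⟨p, Or.inl rfl, Or.inl rfl⟩
      · exact Or.inr ⟨p, Or.inl rfl, Or.inr rfl⟩
      · exact Or.inr ⟨q, Or.inr hq, hcase⟩
    · rintro (h | ⟨q, (rfl | hq), hcase⟩)
      · exact Or.inl (Or.inl (Or.inl h))
      · rcases hcase with h' | h'
        · exact Or.inl (Or.inl (Or.inr h'.symm))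
        · exact Or.inl (Or.inr h'.symm)
      · exact Or.inr ⟨q, hq, hcase⟩

-- facts about one pass of A's inner for-loop

theorem pvDfsInner_facts (N : Nat) (hN : 0 < N) :
    ∀ (ds : List Int) (tmp : List Bool) (st : List Int),
    tmp.length = N → (∀ d ∈ ds, pvInR N d) →
    (pvDfsInner tmp st ds).1.length = N ∧
    (∀ x, (pvDfsInner tmp st ds).1.getD x false = true ↔
        tmp.getD x false = true ∨ ∃ d ∈ ds, pvNrm N d = x) ∧
    (∀ t ∈ (pvDfsInner tmp st ds).2, t ∈ st ∨ t ∈ ds) ∧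
    (∀ t ∈ st, t ∈ (pvDfsInner tmp st ds).2) ∧
    (∀ d ∈ ds, tmp.getD (pvNrm N d) false = true ∨
        ∃ t ∈ (pvDfsInner tmp st ds).2, pvNrm N t = pvNrm N d) ∧
    ((pvDfsInner tmp st ds).1.count false + (pvDfsInner tmp st ds).2.length
        = tmp.count false + st.length) := by
  intro ds
  induction ds with
  | nil => intro tmp st h1 _; simp [pvDfsInner, h1]
  | cons d ds ih =>
    intro tmp st h1 h2
    have hd : pvInR N d := h2 d (by simp)
    have hdl : pvInR tmp.length d := by rw [h1]; exact hd
    have hnd : pvNrm N d < N := pvNrm_lt N d hd hN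
    have hstep : pvDfsInner tmp st (d :: ds) =
        if tmp.getD (pvNrm N d) false then pvDfsInner tmp st ds
        else pvDfsInner (tmp.set (pvNrm N d) true) (st ++ [d]) ds := by
      simp only [pvDfsInner, List.foldl_cons, pvGetD_nrm _ _ _ hdl, pvSetD_nrm _ _ _ hdl, h1]
      split <;> rfl
    by_cases hm : tmp.getD (pvNrm N d) false = true
    · rw [hstep, if_pos hm]
      obtain ⟨i1, i2, i3, i4, i5, i6⟩ := ih tmp st h1 (fun e he => h2 e (by simp [he]))
      refine ⟨i1, ?_, ?_, i4, ?_, i6⟩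
      · intro x
        rw [i2 x]
        constructor
        · rintro (h | ⟨e, he, rfl⟩)
          · exact Or.inl h
          · exact Or.inr ⟨e, by simp [he]⟩
        · rintro (h | ⟨e, he, rfl⟩)
          · exact Or.inl h
          · rcases List.mem_cons.mp he with rfl | he'
            · exact Or.inl hm
            · exact Or.inr ⟨e, he', rfl⟩
      · intro t ht
        rcases i3 t ht with h | h
        · exact Or.inl h
        · exact Or.inr (by simp [h])
      · intro e he
        rcases List.mem_cons.mp he with rfl | he'
        · exact Or.inl hm
        · exact i5 e he'
    · rw [hstep, if_neg (by simpa using hm)]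
      have hm' : tmp.getD (pvNrm N d) false = false := by
        cases h : tmp.getD (pvNrm N d) false
        · rfl
        · exact absurd h hm
      have hl' : (tmp.set (pvNrm N d) true).length = N := by simp [h1]
      obtain ⟨i1, i2, i3, i4, i5, i6⟩ := ih (tmp.set (pvNrm N d) true) (st ++ [d]) hl'
        (fun e he => h2 e (by simp [he]))
      have hset : ∀ x, (tmp.set (pvNrm N d) true).getD x false = true ↔
          tmp.getD x false = true ∨ x = pvNrm N d := by
        intro x
        rw [pvGetD_set _ _ _ _ _ (by rw [h1]; exact hnd)]
        split <;> simp_all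
      refine ⟨i1, ?_, ?_, ?_, ?_, ?_⟩
      · intro x
        rw [i2 x]
        simp only [hset]
        constructor
        · rintro ((h | rfl) | ⟨e, he, rfl⟩)
          · exact Or.inl h
          · exact Or.inr ⟨d, by simp⟩
          · exact Or.inr ⟨e, by simp [he]⟩
        · rintro (h | ⟨e, he, rfl⟩)
          · exact Or.inl (Or.inl h)
          · rcases List.mem_cons.mp he with rfl | he'
            · exact Or.inl (Or.inr rfl)
            · exact Or.inr ⟨e, he', rfl⟩
      · intro t ht
        rcases i3 t ht with h | h
        · rcases List.mem_append.mp h with h' | h'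
          · exact Or.inl h'
          · exact Or.inr (by simpa using Or.inl (List.mem_singleton.mp h'))
        · exact Or.inr (by simp [h])
      · intro t ht
        exact i4 t (by simp [ht])
      · intro e he
        rcases List.mem_cons.mp he with rfl | he'
        · exact Or.inr ⟨e, i4 e (by simp), rfl⟩
        · rcases i5 e he' with h | h
          · rcases (hset (pvNrm N e)).mp h with h' | h'
            · exact Or.inl h'
            · exact Or.inr ⟨d, i4 d (by simp), h'.symm⟩
          · exact Or.inr h
      · have hc : (tmp.set (pvNrm N d) true).count false + 1 = tmp.count false := by
          have := pvCount_set_true tmp (pvNrm N d) (by rw [h1]; exact hnd)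
          rw [if_pos hm'] at this
          omega
        rw [i6]
        simp [List.length_append]
        omega

def pvAdj (n : Int) (edges : List (Int × Int)) (x y : Nat) : Prop :=
  ∃ p ∈ edges, (pvNrm n.toNat p.1 = x ∧ pvNrm n.toNat p.2 = y) ∨
               (pvNrm n.toNat p.1 = y ∧ pvNrm n.toNat p.2 = x)

def pvReach (n : Int) (edges : List (Int × Int)) : Nat → Nat → Prop :=
  Relation.ReflTransGen (pvAdj n edges)

theorem pvDfsLoop_main (n : Int) (edges : List (Int × Int)) (hn : 0 < n.toNat)
    (hb : ∀ p ∈ edges, pvInR n.toNat p.1 ∧ pvInR n.toNat p.2)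
    (succ : List (List Int)) (hsl : succ.length = n.toNat)
    (hchar : ∀ x d, d ∈ succ.getD x [] ↔
        ∃ p ∈ edges, ((pvNrm n.toNat p.1 = x ∧ p.2 = d) ∨ (pvNrm n.toNat p.2 = x ∧ p.1 = d)))
    (i0 : Nat) (hi0 : i0 < n.toNat) :
    ∀ (fuel : Nat) (tmp : List Bool) (tmp1 : List Int),
    tmp.length = n.toNat →
    tmp.count false + tmp1.length < fuel →
    (∀ s ∈ tmp1, pvInR n.toNat s ∧ tmp.getD (pvNrm n.toNat s) false = true) →
    (∀ x, tmp.getD x false = true → pvReach n edges i0 x) →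
    tmp.getD i0 false = true →
    (∀ x, tmp.getD x false = true →
      (∃ s ∈ tmp1, pvNrm n.toNat s = x) ∨ (∀ y, pvAdj n edges x y → tmp.getD y false = true)) →
    (pvDfsLoop succ fuel tmp tmp1).length = n.toNat ∧
    ∀ x, ((pvDfsLoop succ fuel tmp tmp1).getD x false = true ↔ pvReach n edges i0 x) := by
  have mem_succ_inR : ∀ x d, d ∈ succ.getD x [] → pvInR n.toNat d := by
    intro x d hd
    rcases (hchar x d).mp hd with ⟨p, hp, ⟨_, rfl⟩ | ⟨_, rfl⟩⟩
    · exact (hb p hp).2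
    · exact (hb p hp).1
  have mem_succ_adj : ∀ x d, d ∈ succ.getD x [] → pvAdj n edges x (pvNrm n.toNat d) := by
    intro x d hd
    rcases (hchar x d).mp hd with ⟨p, hp, ⟨h1, rfl⟩ | ⟨h1, rfl⟩⟩
    · exact ⟨p, hp, Or.inl ⟨h1, rfl⟩⟩
    · exact ⟨p, hp, Or.inr ⟨rfl, h1⟩⟩
  have adj_mem_succ : ∀ x y, pvAdj n edges x y → ∃ d ∈ succ.getD x [], pvNrm n.toNat d = y := by
    intro x y ⟨p, hp, hc⟩
    rcases hc with ⟨h1, h2⟩ | ⟨h1, h2⟩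
    · exact ⟨p.2, (hchar x p.2).mpr ⟨p, hp, Or.inl ⟨h1, rfl⟩⟩, h2⟩
    · exact ⟨p.1, (hchar x p.1).mpr ⟨p, hp, Or.inr ⟨h2, rfl⟩⟩, h1⟩
  intro fuel
  induction fuel with
  | zero => intro tmp tmp1 _ hf _ _ _ _; omega
  | succ fuel ih =>
    intro tmp tmp1 h1 hf inv3 inv2 hini inv6
    cases htl : tmp1.getLast? with
    | none =>
      have ht : tmp1 = [] := List.getLast?_eq_none_iff.mp htl
      have hres : pvDfsLoop succ (fuel + 1) tmp tmp1 = tmp := by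
        simp [pvDfsLoop, htl]
      rw [hres]
      refine ⟨h1, fun x => ⟨inv2 x, ?_⟩⟩
      intro hr
      induction hr with
      | refl => exact hini
      | tail _ hadj ihr =>
        rcases inv6 _ ihr with ⟨s, hs, _⟩ | hcl
        · rw [ht] at hs; simp at hs
        · exact hcl _ hadj
    | some s =>
      obtain ⟨pre, rfl⟩ := List.getLast?_eq_some_iff.mp htl
      have hdrop : (pre ++ [s]).dropLast = pre := by simp
      have hsmem : s ∈ pre ++ [s] := by simp
      obtain ⟨hsR, hsM⟩ := inv3 s hsmem
      have hds : PySem.List.pyGetD succ s [] = succ.getD (pvNrm n.toNat s) [] := by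
        rw [pvGetD_nrm _ _ _ (by rw [hsl]; exact hsR), hsl]
      set ds := succ.getD (pvNrm n.toNat s) [] with hdsdef
      have hdsb : ∀ d ∈ ds, pvInR n.toNat d := fun d hd => mem_succ_inR _ d hd
      obtain ⟨i1, i2, i3, i4, i5, i6⟩ := pvDfsInner_facts n.toNat hn ds tmp pre h1 hdsb
      have hres : pvDfsLoop succ (fuel + 1) tmp (pre ++ [s]) =
          pvDfsLoop succ fuel (pvDfsInner tmp pre ds).1 (pvDfsInner tmp pre ds).2 := by
        simp [pvDfsLoop, htl, hdrop, hds]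
      rw [hres]
      apply ih
      · exact i1
      · have : (pre ++ [s]).length = pre.length + 1 := by simp
        omega
      · intro t ht
        rcases i3 t ht with h | h
        · obtain ⟨hR, hM⟩ := inv3 t (by simp [h])
          exact ⟨hR, (i2 _).mpr (Or.inl hM)⟩
        · exact ⟨hdsb t h, (i2 _).mpr (Or.inr ⟨t, h, rfl⟩)⟩
      · intro x hx
        rcases (i2 x).mp hx with h | ⟨d, hd, rfl⟩
        · exact inv2 x h
        · exact Relation.ReflTransGen.tail (inv2 _ hsM) (mem_succ_adj _ d hd)
      · exact (i2 _).mpr (Or.inl hini)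
      · intro x hx
        by_cases hold : tmp.getD x false = true
        · rcases inv6 x hold with ⟨s0, hs0, rfl⟩ | hcl
          · rcases List.mem_append.mp hs0 with h | h
            · exact Or.inl ⟨s0, i4 s0 h, rfl⟩
            · have hs0s : s0 = s := by simpa using h
              subst hs0s
              refine Or.inr ?_
              intro y hadj
              obtain ⟨d, hd, rfl⟩ := adj_mem_succ _ y hadj
              exact (i2 _).mpr (Or.inr ⟨d, hd, rfl⟩)
          · exact Or.inr fun y hy => (i2 _).mpr (Or.inl (hcl y hy))
        · rcases (i2 x).mp hx with h | ⟨d, hd, rfl⟩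
          · exact absurd h hold
          · rcases i5 d hd with h | ⟨t, ht, hteq⟩
            · exact absurd h hold
            · exact Or.inl ⟨t, ht, hteq⟩

theorem pvBPass_facts (N : Nat) (hN : 0 < N) :
    ∀ (es : List (Int × Int)) (r : List Bool) (c : Bool),
    r.length = N → (∀ p ∈ es, pvInR N p.1 ∧ pvInR N p.2) →
    (pvBPass es (r, c)).1.length = N ∧
    (∀ x, r.getD x false = true → (pvBPass es (r, c)).1.getD x false = true) ∧
    (c = true → (pvBPass es (r, c)).2 = true) ∧
    ((pvBPass es (r, c)).2 = false → (pvBPass es (r, c)).1 = r ∧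
        ∀ p ∈ es, r.getD (pvNrm N p.1) false = r.getD (pvNrm N p.2) false) ∧
    ((pvBPass es (r, c)).1.count false ≤ r.count false) ∧
    (c = false → (pvBPass es (r, c)).2 = true → (pvBPass es (r, c)).1.count false < r.count false) ∧
    (∀ S : Nat → Prop,
      (∀ p ∈ es, ∀ x y, ((pvNrm N p.1 = x ∧ pvNrm N p.2 = y) ∨ (pvNrm N p.1 = y ∧ pvNrm N p.2 = x)) → S x → S y) →
      (∀ x, r.getD x false = true → S x) →
      ∀ x, (pvBPass es (r, c)).1.getD x false = true → S x) := by
  intro es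
  induction es with
  | nil => intro r c h1 _; exact ⟨h1, fun _ h => h, fun h => h, fun _ => ⟨rfl, by simp⟩,
      le_refl _, fun hc h2 => by simp [pvBPass] at hc h2; rw [hc] at h2; exact absurd h2 (by simp),
      fun S _ hr => hr⟩
  | cons p es ih =>
    intro r c h1 h2
    obtain ⟨hp1, hp2⟩ := h2 p (by simp)
    have hn1 : pvNrm N p.1 < N := pvNrm_lt N p.1 hp1 hN
    have hn2 : pvNrm N p.2 < N := pvNrm_lt N p.2 hp2 hN
    have hg1 : PySem.List.pyGetD r p.1 false = r.getD (pvNrm N p.1) false := by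
      rw [pvGetD_nrm _ _ _ (by rw [h1]; exact hp1), h1]
    have hg2 : PySem.List.pyGetD r p.2 false = r.getD (pvNrm N p.2) false := by
      rw [pvGetD_nrm _ _ _ (by rw [h1]; exact hp2), h1]
    by_cases hfire : r.getD (pvNrm N p.1) false = r.getD (pvNrm N p.2) false
    · have hstep : pvBPass (p :: es) (r, c) = pvBPass es (r, c) := by
        simp only [pvBPass, List.foldl_cons, hg1, hg2, hfire]
        simp
      rw [hstep]
      obtain ⟨i1, i2, i3, i4, i5, i6, i7⟩ := ih r c h1 (fun q hq => h2 q (by simp [hq]))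
      clear ih
      refine ⟨i1, i2, i3, ?_, i5, i6, ?_⟩
      · intro hc
        obtain ⟨e1, e2⟩ := i4 hc
        refine ⟨e1, ?_⟩
        intro q hq
        rcases List.mem_cons.mp hq with rfl | hq'
        · exact hfire
        · exact e2 q hq'
      · intro S hS hr
        exact i7 S (fun q hq => hS q (by simp [hq])) hr
    · have hne : pvNrm N p.1 ≠ pvNrm N p.2 := fun h => hfire (by rw [h])
      set r' := (r.set (pvNrm N p.1) true).set (pvNrm N p.2) true with hr'
      have hA : PySem.List.pySetD r p.1 true = r.set (pvNrm N p.1) true := by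
        rw [pvSetD_nrm _ _ _ (by rw [h1]; exact hp1), h1]
      have hlA : (r.set (pvNrm N p.1) true).length = N := by simp [h1]
      have hB : PySem.List.pySetD (r.set (pvNrm N p.1) true) p.2 true = r' := by
        rw [pvSetD_nrm _ _ _ (by rw [hlA]; exact hp2), hlA, hr']
      have hstep : pvBPass (p :: es) (r, c) = pvBPass es (r', true) := by
        simp only [pvBPass, List.foldl_cons, hg1, hg2]
        rw [if_pos (by simpa using hfire), hA, hB]
      rw [hstep]
      have hl' : r'.length = N := by simp [hr', h1]
      obtain ⟨i1, i2, i3, i4, i5, i6, i7⟩ := ih r' true hl' (fun q hq => h2 q (by simp [hq]))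
      clear ih
      have hget' : ∀ x, r'.getD x false = true ↔
          r.getD x false = true ∨ x = pvNrm N p.1 ∨ x = pvNrm N p.2 := by
        intro x
        rw [hr', pvGetD_set _ _ _ _ _ (by simp [h1]; exact hn2),
            pvGetD_set _ _ _ _ _ (by rw [h1]; exact hn1)]
        by_cases e2 : x = pvNrm N p.2
        · simp [e2]
        · rw [if_neg e2]
          by_cases e1 : x = pvNrm N p.1
          · simp [e1, e2]
          · rw [if_neg e1]
            simp [e1, e2]
      have hcount : r'.count false < r.count false := by
        have hone : r.getD (pvNrm N p.1) false = false ∨ r.getD (pvNrm N p.2) false = false := by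
          cases ha : r.getD (pvNrm N p.1) false
          · exact Or.inl rfl
          · cases hb : r.getD (pvNrm N p.2) false
            · exact Or.inr rfl
            · exact absurd (ha.trans hb.symm) hfire
        have c1 := pvCount_set_true r (pvNrm N p.1) (by rw [h1]; exact hn1)
        have c2 := pvCount_set_true (r.set (pvNrm N p.1) true) (pvNrm N p.2)
          (by simp [h1]; exact hn2)
        have hg21 : (r.set (pvNrm N p.1) true).getD (pvNrm N p.2) false
            = r.getD (pvNrm N p.2) false := by
          rw [pvGetD_set _ _ _ _ _ (by rw [h1]; exact hn1), if_neg (Ne.symm hne)]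
        rcases hone with h | h
        · rw [if_pos h] at c1
          rw [hg21] at c2
          rw [← hr'] at c2
          split at c2 <;> omega
        · rw [hg21, if_pos h] at c2
          rw [← hr'] at c2
          split at c1 <;> omega
      refine ⟨i1, ?_, fun _ => i3 rfl, ?_, ?_, ?_, ?_⟩
      · intro x hx
        exact i2 x ((hget' x).mpr (Or.inl hx))
      · intro hc
        exact absurd (i3 rfl) (by rw [hc]; simp)
      · exact le_trans i5 (le_of_lt hcount)
      · intro _ _
        exact lt_of_le_of_lt i5 hcount
      · intro S hS hr
        apply i7 S (fun q hq => hS q (by simp [hq]))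
        intro x hx
        rcases (hget' x).mp hx with h | rfl | rfl
        · exact hr x h
        · rcases hone : r.getD (pvNrm N p.1) false with _ | _
          · have h2t : r.getD (pvNrm N p.2) false = true := by
              cases hb : r.getD (pvNrm N p.2) false
              · exact absurd (by rw [hone, hb]) hfire
              · rfl
            exact hS p (by simp) (pvNrm N p.2) (pvNrm N p.1)
              (Or.inr ⟨rfl, rfl⟩) (hr _ h2t)
          · exact hr _ hone
        · rcases hone : r.getD (pvNrm N p.2) false with _ | _
          · have h1t : r.getD (pvNrm N p.1) false = true := by
              cases hb : r.getD (pvNrm N p.1) false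
              · exact absurd (by rw [hone, hb]) hfire
              · rfl
            exact hS p (by simp) (pvNrm N p.1) (pvNrm N p.2)
              (Or.inl ⟨rfl, rfl⟩) (hr _ h1t)
          · exact hr _ hone

theorem pvBLoop_main (n : Int) (edges : List (Int × Int)) (hn : 0 < n.toNat)
    (hb : ∀ p ∈ edges, pvInR n.toNat p.1 ∧ pvInR n.toNat p.2)
    (i0 : Nat) (hi0 : i0 < n.toNat) :
    ∀ (fuel : Nat) (r : List Bool),
    r.length = n.toNat →
    r.count false < fuel →
    r.getD i0 false = true →
    (∀ x, r.getD x false = true → pvReach n edges i0 x) →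
    (pvBLoop edges fuel r).length = n.toNat ∧
    ∀ x, ((pvBLoop edges fuel r).getD x false = true ↔ pvReach n edges i0 x) := by
  intro fuel
  induction fuel with
  | zero => intro r _ hf _ _; omega
  | succ fuel ih =>
    intro r h1 hf hini hsnd
    obtain ⟨i1, i2, i3, i4, i5, i6, i7⟩ := pvBPass_facts n.toNat hn edges r false h1 hb
    cases hc : (pvBPass edges (r, false)).2 with
    | true =>
      have hres : pvBLoop edges (fuel + 1) r = pvBLoop edges fuel (pvBPass edges (r, false)).1 := by
        simp [pvBLoop, hc]
      rw [hres]
      apply ih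
      · exact i1
      · have := i6 rfl hc
        omega
      · exact i2 i0 hini
      · intro x hx
        apply i7 (pvReach n edges i0) ?_ hsnd x hx
        intro p hp x' y' hcase hx'
        exact Relation.ReflTransGen.tail hx' ⟨p, hp, hcase⟩
    | false =>
      obtain ⟨heq, hagree⟩ := i4 hc
      have hres : pvBLoop edges (fuel + 1) r = r := by
        simp [pvBLoop, hc, heq]
      rw [hres]
      refine ⟨h1, fun x => ⟨hsnd x, ?_⟩⟩
      intro hr
      induction hr with
      | refl => exact hini
      | tail _ hadj ihr =>
        obtain ⟨p, hp, hcase⟩ := hadj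
        rcases hcase with ⟨h1', h2'⟩ | ⟨h1', h2'⟩
        · rw [← h2', ← hagree p hp]
          rw [← h1'] at ihr
          exact ihr
        · rw [← h1', hagree p hp]
          rw [← h2'] at ihr
          exact ihr

theorem pvZipAll (xs ys : List Bool) (h : xs.length = ys.length) :
    ((xs.zip ys).all (fun p => !p.2 || p.1) = true) ↔
    ∀ i : Nat, ys.getD i false = true → xs.getD i false = true := by
  induction xs generalizing ys with
  | nil =>
    cases ys with
    | nil => simp
    | cons _ _ => simp at h
  | cons x xs ih =>
    cases ys with
    | nil => simp at h
    | cons y ys =>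
      simp only [List.zip_cons_cons, List.all_cons, Bool.and_eq_true]
      rw [ih ys (by simpa using h)]
      constructor
      · rintro ⟨hxy, hrest⟩ i
        cases i with
        | zero => intro hy; cases x <;> cases y <;> simp_all
        | succ j => exact hrest j
      · intro hall
        refine ⟨?_, fun j => hall (j + 1)⟩
        have := hall 0
        cases x <;> cases y <;> simp_all

theorem pvMainCase (n : Int) (edges : List (Int × Int)) (hn : 0 < n)
    (hE : edges ≠ [])
    (hbi : ∀ p ∈ edges, (-n ≤ p.1 ∧ p.1 < n) ∧ (-n ≤ p.2 ∧ p.2 < n)) :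
    is_edge_connected n edges = is_edge_connected_alt n edges := by
  have hnN : 0 < n.toNat := by omega
  have hcast : (n.toNat : Int) = n := by omega
  have hb : ∀ p ∈ edges, pvInR n.toNat p.1 ∧ pvInR n.toNat p.2 := by
    intro p hp
    obtain ⟨⟨a1, a2⟩, ⟨b1, b2⟩⟩ := hbi p hp
    exact ⟨⟨by omega, by omega⟩, ⟨by omega, by omega⟩⟩
  obtain ⟨p0, rest, rfl⟩ := List.exists_cons_of_ne_nil hE
  set edges := p0 :: rest with hedges
  have hguard : ¬(n = 0 ∨ edges.length = 0) := by
    rintro (h | h)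
    · omega
    · simp [hedges] at h
  -- the common initial vertex
  have hp0 : pvInR n.toNat p0.1 ∧ pvInR n.toNat p0.2 := hb p0 (by simp [hedges])
  set i0 := pvNrm n.toNat p0.1 with hi0def
  have hi0 : i0 < n.toNat := pvNrm_lt _ _ hp0.1 hnN
  -- the common initial marking
  have hinit : PySem.List.pyGetD edges 0 ((0 : Int), (0 : Int)) = p0 := by
    simp [hedges, PySem.List.pyGetD, PySem.List.pyGet?, PySem.List.pyIdx?]
  set tmp0 : List Bool := PySem.List.pySetD (List.replicate n.toNat false) p0.1 true with htmp0
  have htmp0eq : tmp0 = (List.replicate n.toNat false).set i0 true := by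
    rw [htmp0, pvSetD_nrm _ _ _ (by simpa using hp0.1)]
    simp [hi0def]
  have htmp0len : tmp0.length = n.toNat := by simp [htmp0eq]
  have htmp0get : ∀ x, tmp0.getD x false = true ↔ x = i0 := by
    intro x
    rw [htmp0eq, pvGetD_set _ _ _ _ _ (by simpa using hi0)]
    split <;> simp_all [pvGetD_replicate]
  have htmp0count : tmp0.count false + 1 = n.toNat := by
    have := pvCount_set_true (List.replicate n.toNat false) i0 (by simpa using hi0)
    rw [if_pos (pvGetD_replicate _ _)] at this
    rw [htmp0eq]
    simpa using this
  -- A's successor table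
  set succ0 : List (List Int) := (PySem.List.pyRange 0 n 1).map (fun _ => ([] : List Int))
    with hsucc0
  have hsucc0len : succ0.length = n.toNat := by simp [hsucc0, PySem.List.length_pyRange_one]
  have hsucc0get : ∀ x : Nat, succ0.getD x [] = [] := by
    intro x
    rw [hsucc0]
    cases h : (PySem.List.pyRange 0 n 1)[x]? <;>
      simp [List.getD_eq_getElem?_getD, h]
  set succ := edges.foldl (fun succ p =>
      let succ := PySem.List.pySetD succ p.1 (PySem.List.pyGetD succ p.1 [] ++ [p.2])
      PySem.List.pySetD succ p.2 (PySem.List.pyGetD succ p.2 [] ++ [p.1])) succ0 with hsucc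
  obtain ⟨hsl, hsmem⟩ := pvSucc_facts n.toNat hnN edges succ0 hsucc0len hb
  rw [← hsucc] at hsl hsmem
  have hchar : ∀ x d, d ∈ succ.getD x [] ↔
      ∃ p ∈ edges, ((pvNrm n.toNat p.1 = x ∧ p.2 = d) ∨ (pvNrm n.toNat p.2 = x ∧ p.1 = d)) := by
    intro x d
    rw [hsmem x d, hsucc0get x]
    simp
  -- run A's loop
  obtain ⟨hAlen, hAiff⟩ := pvDfsLoop_main n edges hnN hb succ hsl hchar i0 hi0
    (n.toNat + 1) tmp0 [p0.1]
    htmp0len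
    (by simp; omega)
    (by intro s hs; rcases List.mem_singleton.mp hs with rfl;
        exact ⟨hp0.1, (htmp0get _).mpr rfl⟩)
    (by intro x hx; rw [(htmp0get x).mp hx]; exact Relation.ReflTransGen.refl)
    ((htmp0get i0).mpr rfl)
    (by intro x hx; exact Or.inl ⟨p0.1, by simp, ((htmp0get x).mp hx).symm⟩)
  -- run B's loop
  obtain ⟨hBlen, hBiff⟩ := pvBLoop_main n edges hnN hb i0 hi0 (n.toNat + 1) tmp0
    htmp0len
    (by omega)
    ((htmp0get i0).mpr rfl)
    (by intro x hx; rw [(htmp0get x).mp hx]; exact Relation.ReflTransGen.refl)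
  -- B's touched table
  set touched := edges.foldl (fun t p =>
      PySem.List.pySetD (PySem.List.pySetD t p.1 true) p.2 true)
    (List.replicate n.toNat false) with htouched
  obtain ⟨hTlen, hTmem⟩ := pvTouched_facts n.toNat hnN edges (List.replicate n.toNat false)
    (by simp) hb
  rw [← htouched] at hTlen hTmem
  have hTchar : ∀ x : Nat, touched.getD x false = true ↔
      ∃ p ∈ edges, (pvNrm n.toNat p.1 = x ∨ pvNrm n.toNat p.2 = x) := by
    intro x
    rw [hTmem x, pvGetD_replicate]
    simp
  -- reduce both ports
  have hA : is_edge_connected n edges =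
      (PySem.List.pyRange 0 n 1).all (fun a =>
        !(!(PySem.List.pyGetD succ a []).isEmpty &&
          !PySem.List.pyGetD (pvDfsLoop succ (n.toNat + 1) tmp0 [p0.1]) a false)) := by
    rw [is_edge_connected, if_neg (by simpa using hguard)]
    rw [hinit]
  have hB : is_edge_connected_alt n edges =
      ((pvBLoop edges (n.toNat + 1) tmp0).zip touched).all (fun p => !p.2 || p.1) := by
    rw [is_edge_connected_alt, if_neg (by simpa using hguard)]
    rw [hinit]
  rw [hA, hB]
  set tmpF := pvDfsLoop succ (n.toNat + 1) tmp0 [p0.1] with htmpF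
  set rF := pvBLoop edges (n.toNat + 1) tmp0 with hrF
  -- both sides express: every touched vertex is reachable
  have hAside : ((PySem.List.pyRange 0 n 1).all (fun a =>
      !(!(PySem.List.pyGetD succ a []).isEmpty && !PySem.List.pyGetD tmpF a false)) = true) ↔
      ∀ x : Nat, x < n.toNat → (∃ p ∈ edges, (pvNrm n.toNat p.1 = x ∨ pvNrm n.toNat p.2 = x)) →
        pvReach n edges i0 x := by
    rw [List.all_eq_true]
    constructor
    · intro h x hx htch
      have hmem : (x : Int) ∈ PySem.List.pyRange 0 n 1 :=
        PySem.List.mem_pyRange_one.mpr ⟨by omega, by omega⟩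
      have hxin : pvInR n.toNat (x : Int) := ⟨by omega, by omega⟩
      have hxnrm : pvNrm n.toNat (x : Int) = x := by simp [pvNrm]
      have := h _ hmem
      rw [pvGetD_nrm _ _ _ (by rw [hsl]; exact hxin), hsl, hxnrm,
        pvGetD_nrm _ _ _ (by rw [hAlen]; exact hxin), hAlen, hxnrm] at this
      have hne : succ.getD x [] ≠ [] := by
        obtain ⟨p, hp, hc⟩ := htch
        rcases hc with h' | h'
        · exact fun hnil => by
            have := (hchar x p.2).mpr ⟨p, hp, Or.inl ⟨h', rfl⟩⟩
            rw [hnil] at this; simp at this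
        · exact fun hnil => by
            have := (hchar x p.1).mpr ⟨p, hp, Or.inr ⟨h', rfl⟩⟩
            rw [hnil] at this; simp at this
      rw [← hAiff x]
      rcases hmk : tmpF.getD x false with _ | _
      · rw [hmk] at this
        simp [List.isEmpty_iff] at this
        rw [List.getD_eq_getElem?_getD] at hne
        exact absurd this hne
      · rfl
    · intro h a hmem
      obtain ⟨ha0, han⟩ := PySem.List.mem_pyRange_one.mp hmem
      have hain : pvInR n.toNat a := ⟨by omega, by omega⟩
      have hanrm : pvNrm n.toNat a < n.toNat := pvNrm_lt _ _ hain hnN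
      rw [pvGetD_nrm _ _ _ (by rw [hsl]; exact hain), hsl,
        pvGetD_nrm _ _ _ (by rw [hAlen]; exact hain), hAlen]
      rcases hni : (succ.getD (pvNrm n.toNat a) []).isEmpty with _ | _
      · have hne : succ.getD (pvNrm n.toNat a) [] ≠ [] := by
          intro hnil; rw [hnil] at hni; simp at hni
        obtain ⟨d, hd⟩ := List.exists_mem_of_ne_nil _ hne
        obtain ⟨p, hp, hc⟩ := (hchar _ d).mp hd
        have htch : ∃ p ∈ edges, (pvNrm n.toNat p.1 = pvNrm n.toNat a ∨
            pvNrm n.toNat p.2 = pvNrm n.toNat a) := by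
          rcases hc with ⟨h', _⟩ | ⟨h', _⟩
          · exact ⟨p, hp, Or.inl h'⟩
          · exact ⟨p, hp, Or.inr h'⟩
        have := (hAiff _).mpr (h _ hanrm htch)
        rw [this]
        simp
      · simp
  have hBside : ((rF.zip touched).all (fun p => !p.2 || p.1) = true) ↔
      ∀ x : Nat, x < n.toNat → (∃ p ∈ edges, (pvNrm n.toNat p.1 = x ∨ pvNrm n.toNat p.2 = x)) →
        pvReach n edges i0 x := by
    rw [pvZipAll rF touched (by rw [hBlen, hTlen])]
    constructor
    · intro h x hx htch
      rw [← hBiff x]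
      exact h x ((hTchar x).mpr htch)
    · intro h i hti
      have htch := (hTchar i).mp hti
      have hiN : i < n.toNat := by
        by_contra hge
        rw [pvGetD_out _ _ _ (by omega : touched.length ≤ i)] at hti
        exact absurd hti (by simp)
      exact (hBiff i).mpr (h i hiN htch)
  rcases hAv : (PySem.List.pyRange 0 n 1).all (fun a =>
      !(!(PySem.List.pyGetD succ a []).isEmpty && !PySem.List.pyGetD tmpF a false)) with _ | _
  · rcases hBv : (rF.zip touched).all (fun p => !p.2 || p.1) with _ | _
    · rfl
    · exact absurd (hAside.mpr (hBside.mp hBv)) (by rw [hAv]; simp)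
  · rcases hBv : (rF.zip touched).all (fun p => !p.2 || p.1) with _ | _
    · exact absurd (hBside.mpr (hAside.mp hAv)) (by rw [hBv]; simp)
    · rfl

-- ===== VERDICT (by name: the statement is the Claim_ definition above) =====
theorem is_edge_connected_spec : Claim_equal_is_edge_connected := by
  intro n edges _ hpre
  unfold Spec_is_edge_connected
  rcases hpre with h0 | hE | ⟨hn, hb⟩
  · subst h0
    simp [is_edge_connected, is_edge_connected_alt]
  · subst hE
    simp [is_edge_connected, is_edge_connected_alt]
  · by_cases hE : edges = []
    · subst hE
      simp [is_edge_connected, is_edge_connected_alt]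
    · exact pvMainCase n edges hn hE hb
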